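-- pv_equiv track=rewrite | github.com/pypi-data/pypi-mirror-332 | packages/board2048/board2048-1.0.0.tar.gz/board2048-1.0.0/board2048.py | rowCanShift
-- ===== SOURCE A (Python) =====
-- from typing import List
--
-- def rowCanShift(row: List[int]):
--     '''
--     Given a row, check if it is shiftable "to the left" i.e. toward 0
--     Example: [None, 2, 2 , 4] is shiftable
--     Example: [2, 2, None , 4] is shiftable
--     Example: [2, 4, None , None] is not shiftable
--     Example: [2, 2, None , None] is shiftable because the 2's can merge
--     Example: [None, None, None , None] is not shiftable
--
--     Returns:
--         boolean: Is the row shiftable toward 0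
--     '''
--
--     # Move all empty spaces to end of row
--     rowCopy = row.copy()
--     i = 0
--     for _ in range(len(row)-1):
--         if rowCopy[i] == None:
--             val = rowCopy.pop(i)
--             rowCopy.append(val)
--         else:
--             i += 1
--
--     # Merge tiles starting from the left (i.e. 0)
--     i = 0
--     while i < len(rowCopy)-1:
--         if rowCopy[i] != None and rowCopy[i] == rowCopy[i+1]:
--             rowCopy[i] = rowCopy[i] * 2
--             rowCopy.pop(i+1)
--             rowCopy.append(None)
--             i += 2
--         else:
--             i += 1
--
--     # if rowCopy is different from row, then we can shift
--     return rowCopy != row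
--
--     # all
--     if row.count(None) == len(row):
--         return False
--
--     # find largest index with non-None, then search for any None index smaller that it
--     i = len(row)-1
--     if row[i] == None:
--         # look for non-None
--         while i > 0 and row[i] == None:
--             i -= 1
--
--     # find a index j < i where row[j] is empty
--     j = 0
--     while j < i and row[j] != None:
--         j += 1
--
--     # if empyty spot is before a filled spot, then we can shift legeally
--     if j < i:
--         return True
--
--     # from index 0 until a None, look for "mergeable" tiles (i.e. equivalent)
--     i = 0
--     while i < len(row)-1 and row[i] != None:
--         if row[i] == row[i+1]:
--             return True
--         i += 1
--     return False
-- ===== SOURCE B (Python) =====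
-- from typing import List
--
-- def rowCanShift(row: List[int]):
--     '''
--     Single linear pass: the row shifts left iff some empty cell appears
--     before a tile, or two consecutive tiles (ignoring gaps) are equal.
--     '''
--     prev = None   # last tile value seen
--     gap = False   # an empty cell has been seen
--     for x in row:
--         if x is None:
--             gap = True
--         elif gap or x == prev:
--             return True
--         else:
--             prev = x
--     return False
-- ===== Notes on version B (the rewrite author's own statement) =====
-- stated objective: faster
-- what changed: A simulates a full shift (compact Nones to the end with repeated pop/append, then a merge pass) and compares the result with the original list; B is a single linear early-exit scan that returns True at the first empty cell followed by a tile or the first pair of equal consecutive tiles.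
import Mathlib
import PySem

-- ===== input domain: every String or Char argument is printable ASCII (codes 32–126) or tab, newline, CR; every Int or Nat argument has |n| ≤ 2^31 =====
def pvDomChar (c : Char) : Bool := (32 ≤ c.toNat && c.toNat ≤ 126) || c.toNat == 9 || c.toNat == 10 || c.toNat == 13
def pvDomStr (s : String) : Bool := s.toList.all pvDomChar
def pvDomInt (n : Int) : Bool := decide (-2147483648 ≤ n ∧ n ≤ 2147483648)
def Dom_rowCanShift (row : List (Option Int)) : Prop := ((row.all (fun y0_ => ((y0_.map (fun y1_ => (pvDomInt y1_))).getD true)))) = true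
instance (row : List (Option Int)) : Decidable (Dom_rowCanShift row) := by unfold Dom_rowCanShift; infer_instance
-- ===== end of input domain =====

-- B replaces A's O(n^2) shift simulation (compact-then-merge, then compare) by one O(n) early-exit scan.


-- ===== PORT A =====
-- the compaction for-loop: `for _ in range(len(row)-1)` over state (rowCopy, i);
-- `rowCopy.pop(i); rowCopy.append(val)` is `l.eraseIdx i ++ [val]` (i is in range:
-- the preceding access rowCopy[i] succeeded)
def pvCompact : Nat → List (Option Int) × Nat → List (Option Int) × Nat
  | 0, s => s
  | t+1, (l, i) =>
    match l[i]? with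
    | some val =>
      if val = none then pvCompact t (l.eraseIdx i ++ [val], i)
      else pvCompact t (l, i+1)
    | none => pvCompact t (l, i)   -- unreachable: Python would raise IndexError here

-- the merge while-loop; length of the list is invariant, and i grows each step,
-- so fuel = length of the list suffices for a faithful run
def pvMerge : Nat → List (Option Int) → Nat → List (Option Int)
  | 0, l, _ => l
  | fuel+1, l, i =>
    if i + 1 < l.length then
      match l[i]?, l[i+1]? with
      | some (some x), some (some y) =>
        if x = y then pvMerge fuel ((l.set i (some (x * 2))).eraseIdx (i+1) ++ [none]) (i+2)
        else pvMerge fuel l (i+1)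
      | _, _ => pvMerge fuel l (i+1)
    else l

def rowCanShift (row : List (Option Int)) : Bool :=
  let rowCopy := (pvCompact (row.length - 1) (row, 0)).1
  let rowCopy := pvMerge row.length rowCopy 0
  decide (rowCopy ≠ row)

-- ===== PORT B =====
-- single scan carrying (prev = last tile value, gap = empty cell seen)
def pvScan : List (Option Int) → Option Int → Bool → Bool
  | [], _, _ => false
  | x :: xs, prev, gap =>
    match x with
    | none => pvScan xs prev true
    | some v => if gap || prev = some v then true else pvScan xs (some v) false

def rowCanShift_alt (row : List (Option Int)) : Bool :=
  pvScan row none false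

-- ===== PRECONDITION & SPEC =====
def Spec_rowCanShift (row : List (Option Int)) (out : Bool) : Prop := out = rowCanShift_alt row
instance (row : List (Option Int)) (out : Bool) : Decidable (Spec_rowCanShift row out) := by unfold Spec_rowCanShift; infer_instance

-- ===== CLAIM (what is proved, stated in full; the proofs are below) =====
def Claim_equal_rowCanShift : Prop := ∀ (row : List (Option Int)), Dom_rowCanShift row → Spec_rowCanShift row (rowCanShift row)

-- ===== LEMMAS AND PROOFS =====

-- proof-only helpers
def pvF (row : List (Option Int)) : List (Option Int) := row.filter (fun x => x.isSome)
def pvK (row : List (Option Int)) : Nat := row.countP (fun x => x == none)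
def pvCS (l : List (Option Int)) : Nat := l.countP (fun x => x.isSome)
-- empty cell strictly before some tile
def pvGap : List (Option Int) → Bool
  | [] => false
  | none :: t => t.any (fun x => x.isSome)
  | some _ :: t => pvGap t
-- two adjacent equal tiles
def pvAdj : List (Option Int) → Bool
  | x :: y :: t => (x.isSome && x == y) || pvAdj (y :: t)
  | _ => false
-- a mergeable pair of l sits at index j
def pvPairB (l : List (Option Int)) (j : Nat) : Bool :=
  match l[j]?, l[j+1]? with
  | some (some a), some (some b) => a == b
  | _, _ => false

-- B characterization ------------------------------------------------------

theorem pvScan_gap (xs : List (Option Int)) (prev : Option Int) :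
    pvScan xs prev true = xs.any (fun x => x.isSome) := by
  induction xs generalizing prev with
  | nil => simp [pvScan]
  | cons x t ih =>
    cases x <;> simp [pvScan, ih]

theorem pvScan_spec (xs : List (Option Int)) (prev : Option Int) :
    pvScan xs prev false = (pvAdj (prev :: pvF xs) || pvGap xs) := by
  induction xs generalizing prev with
  | nil => simp [pvScan, pvF, pvAdj, pvGap]
  | cons x t ih =>
    cases x with
    | none =>
      simp only [pvScan, pvScan_gap, pvF, pvGap, List.filter_cons, Option.isSome_none]
      by_cases h : t.any (fun x => x.isSome)
      · simp [h]
      · have hF : pvF t = [] := by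
          simp only [pvF, List.filter_eq_nil_iff]
          intro a ha
          simp only [List.any_eq_true, not_exists, not_and] at h
          simpa using h a ha
        simp only [pvF] at hF
        simp [h, hF, pvAdj]
    | some v =>
      by_cases hp : prev = some v
      · simp [pvScan, hp, pvF, pvAdj]
      · have : (prev.isSome && prev == some v) = false := by
          cases prev <;> simp_all
        simp [pvScan, hp, pvF, pvAdj, pvGap, this, ih]

theorem alt_spec (row : List (Option Int)) :
    rowCanShift_alt row = (pvAdj (pvF row) || pvGap row) := by
  have h : pvAdj (none :: pvF row) = pvAdj (pvF row) := by
    cases hF : pvF row <;> simp [pvAdj]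
  simpa [rowCanShift_alt, h] using pvScan_spec row none

-- compaction --------------------------------------------------------------

theorem pvCompact_go (b a : List (Option Int)) (p : Nat)
    (ha : ∀ x ∈ a, x.isSome) (hb : b ≠ []) :
    (pvCompact (b.length - 1) (a ++ b ++ List.replicate p none, a.length)).1
      = a ++ pvF b ++ List.replicate (p + pvK b) none := by
  induction b generalizing a p with
  | nil => exact absurd rfl hb
  | cons x b' ih =>
    have hget : (a ++ (x :: b') ++ List.replicate p none)[a.length]? = some x := by
      rw [List.append_assoc, List.getElem?_append_right (le_refl a.length)]
      simp
    cases b' with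
    | nil =>
      -- fuel 0: loop body never runs for this last element
      cases x with
      | none =>
        simp only [pvF, pvK]
        simp [← List.replicate_succ, List.append_assoc]
        simp [pvCompact]
      | some v => simp [pvCompact, pvF, pvK]
    | cons y b'' =>
      have hlen : (x :: y :: b'').length - 1 = ((y :: b'').length - 1) + 1 := by simp
      rw [hlen]
      cases x with
      | none =>
        have herase : (a ++ (none :: y :: b'') ++ List.replicate p none).eraseIdx a.length
            = a ++ (y :: b'') ++ List.replicate p none := by
          rw [List.append_assoc, List.eraseIdx_append_of_length_le (le_refl a.length), List.append_assoc]
          simp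
        have : (a ++ (y :: b'') ++ List.replicate p none) ++ [none]
            = a ++ (y :: b'') ++ List.replicate (p + 1) none := by
          simp [List.replicate_succ']
        simp only [pvCompact, hget, reduceIte]
        rw [herase, this, ih a (p + 1) ha (by simp)]
        simp [pvF, pvK, Nat.add_comm, Nat.add_assoc]
      | some v =>
        have hne : (some v : Option Int) ≠ none := by simp
        simp only [pvCompact, hget, if_neg hne]
        have hstate : a ++ (some v :: y :: b'') ++ List.replicate p none
            = (a ++ [some v]) ++ (y :: b'') ++ List.replicate p none := by simp
        have hi : a.length + 1 = (a ++ [some v]).length := by simp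
        have ha' : ∀ z ∈ a ++ [some v], z.isSome := by
          intro z hz
          rcases List.mem_append.1 hz with h | h
          · exact ha z h
          · simp at h; simp [h]
        rw [hstate, hi, ih (a ++ [some v]) p ha' (by simp)]
        simp [pvF, pvK]

theorem pvCompact_spec (row : List (Option Int)) :
    (pvCompact (row.length - 1) (row, 0)).1 = pvF row ++ List.replicate (pvK row) none := by
  cases row with
  | nil => simp [pvCompact, pvF, pvK]
  | cons x t =>
    have := pvCompact_go (x :: t) [] 0 (by simp) (by simp)
    simpa using this

-- shape facts --------------------------------------------------------------

theorem pvGap_compacted (F : List (Option Int)) (hF : ∀ x ∈ F, x.isSome) (k : Nat) :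
    pvGap (F ++ List.replicate k none) = false := by
  induction F with
  | nil =>
    cases k with
    | zero => simp [pvGap]
    | succ k' =>
      simp only [List.nil_append, List.replicate_succ, pvGap]
      simp
  | cons x t ih =>
    have hx := hF x (by simp)
    cases x with
    | none => simp at hx
    | some v => exact ih (fun z hz => hF z (by simp [hz]))

theorem pv_no_gap_eq (row : List (Option Int)) (h : pvGap row = false) :
    row = pvF row ++ List.replicate (pvK row) none := by
  induction row with
  | nil => simp [pvF, pvK]
  | cons x t ih =>
    cases x with
    | none =>
      have ht : t.any (fun x => x.isSome) = false := by simpa [pvGap] using h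
      have hall : ∀ z ∈ t, z = none := by
        intro z hz
        have := (List.any_eq_false).1 ht z hz
        cases z <;> simp_all
      have hrep : t = List.replicate t.length none := List.eq_replicate_length.2 hall
      have hFt : pvF (none :: t) = [] := by
        simp only [pvF, List.filter_eq_nil_iff]
        intro a ha
        rcases List.mem_cons.1 ha with ha | ha
        · simp [ha]
        · simp [hall a ha]
      have hK : pvK (none :: t) = t.length + 1 := by
        simp only [pvK, List.countP_cons]
        rw [hrep]
        simp [List.countP_replicate]
      rw [hFt, hK]
      simp only [List.nil_append, List.replicate_succ]
      exact congrArg (none :: ·) hrep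
    | some v =>
      have ht : pvGap t = false := by simpa [pvGap] using h
      have : pvK (some v :: t) = pvK t := by simp [pvK]
      rw [this]
      simp only [pvF, List.filter_cons, Option.isSome_some]
      simpa [pvF] using congrArg (some v :: ·) (ih ht)

theorem pvCS_eq_of_eq {l l' : List (Option Int)} (h : l = l') : pvCS l = pvCS l' := by rw [h]

theorem pvCS_compacted (row : List (Option Int)) :
    pvCS (pvF row ++ List.replicate (pvK row) none) = pvCS row := by
  simp [pvCS, pvF, List.countP_append, List.countP_replicate, List.countP_filter]

-- merge loop lemmas --------------------------------------------------------

-- a merge step removes exactly one tile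
theorem pvCS_step (l : List (Option Int)) (i : Nat) (x y : Int) (z : Int)
    (hx : l[i]? = some (some x)) (hy : l[i+1]? = some (some y)) :
    pvCS ((l.set i (some z)).eraseIdx (i+1) ++ [none]) + 1 = pvCS l := by
  have hi : i < l.length := (List.getElem?_eq_some_iff.1 hx).1
  have hi1 : i + 1 < l.length := (List.getElem?_eq_some_iff.1 hy).1
  have hx' : l[i] = some x := by
    have := List.getElem?_eq_getElem hi; rw [hx] at this; exact (Option.some_injective _ this.symm)
  have hy' : l[i+1] = some y := by
    have := List.getElem?_eq_getElem hi1; rw [hy] at this; exact (Option.some_injective _ this.symm)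
  have hd1 : List.drop (i+1) l = some y :: List.drop (i+2) l := by
    rw [List.drop_eq_getElem_cons hi1, hy']
  have hset : l.set i (some z) = (List.take i l ++ [some z]) ++ (some y :: List.drop (i+2) l) := by
    rw [List.set_eq_take_append_cons_drop, if_pos hi, hd1]
    simp
  have hlt : (List.take i l ++ [some z]).length = i + 1 := by
    simp [List.length_take_of_le (Nat.le_of_lt hi)]
  have herase : (l.set i (some z)).eraseIdx (i+1) = (List.take i l ++ [some z]) ++ List.drop (i+2) l := by
    rw [hset, ← hlt, List.eraseIdx_append_of_length_le (le_refl _)]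
    simp
  have hl : l = List.take i l ++ some x :: some y :: List.drop (i+2) l := by
    conv_lhs => rw [← List.take_append_drop i l, List.drop_eq_getElem_cons hi, hx', hd1]
  rw [herase]
  conv_rhs => rw [hl]
  simp [pvCS, List.countP_append]
  omega

theorem pvMerge_le (fuel : Nat) (l : List (Option Int)) (i : Nat) :
    pvMerge fuel l i = l ∨ pvCS (pvMerge fuel l i) < pvCS l := by
  induction fuel generalizing l i with
  | zero => exact Or.inl rfl
  | succ fuel ih =>
    simp only [pvMerge]
    split
    · split
      · rename_i x y hx hy
        split
        · rename_i hxy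
          right
          have hstep := pvCS_step l i x y (x * 2) hx hy
          rcases ih ((l.set i (some (x*2))).eraseIdx (i+1) ++ [none]) (i+2) with h | h
          · rw [h]; omega
          · omega
        · exact ih l (i+1)
      · exact ih l (i+1)
    · exact Or.inl rfl

theorem pvMerge_id (fuel : Nat) (l : List (Option Int)) (i : Nat)
    (h : ∀ j, pvPairB l j = false) : pvMerge fuel l i = l := by
  induction fuel generalizing i with
  | zero => rfl
  | succ fuel ih =>
    simp only [pvMerge]
    split
    · split
      · rename_i x y hx hy
        split
        · rename_i hxy
          exfalso
          have := h i
          simp [pvPairB, hx, hy, hxy] at this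
        · exact ih (i+1)
      · exact ih (i+1)
    · rfl

theorem pvPairB_exists (l : List (Option Int)) (j : Nat) (h : pvPairB l j = true) :
    ∃ x, l[j]? = some (some x) ∧ l[j+1]? = some (some x) := by
  unfold pvPairB at h
  rcases h1 : l[j]? with _ | a <;> rw [h1] at h
  · simp at h
  · rcases a with _ | av
    · simp at h
    · rcases h2 : l[j+1]? with _ | b <;> rw [h2] at h
      · simp at h
      · rcases b with _ | bv
        · simp at h
        · simp only [beq_iff_eq] at h
          exact ⟨av, rfl, by rw [h]⟩

theorem pvMerge_fires (fuel : Nat) (l : List (Option Int)) (i j : Nat)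
    (hj : pvPairB l j = true) (hij : i ≤ j)
    (hmin : ∀ j', i ≤ j' → j' < j → pvPairB l j' = false)
    (hfuel : j < fuel + i) :
    pvCS (pvMerge fuel l i) < pvCS l := by
  induction fuel generalizing i with
  | zero => omega
  | succ fuel ih =>
    have hj1 : j + 1 < l.length := by
      obtain ⟨x, _, hy⟩ := pvPairB_exists l j hj
      exact (List.getElem?_eq_some_iff.1 hy).1
    rcases Nat.eq_or_lt_of_le hij with heq | hlt
    · -- fire at i = j
      subst heq
      obtain ⟨x, hx, hy⟩ := pvPairB_exists l i hj
      simp only [pvMerge, if_pos hj1, hx, hy, if_true]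
      have hstep := pvCS_step l i x x (x * 2) hx hy
      rcases pvMerge_le fuel ((l.set i (some (x*2))).eraseIdx (i+1) ++ [none]) (i+2) with h | h
      · rw [h]; omega
      · omega
    · -- no fire at i
      have hi1 : i + 1 < l.length := by omega
      have hni : pvPairB l i = false := hmin i (le_refl i) hlt
      simp only [pvMerge, if_pos hi1]
      have hrec : pvCS (pvMerge fuel l (i+1)) < pvCS l :=
        ih (i+1) hlt (fun j' h1 h2 => hmin j' (by omega) h2) (by omega)
      rcases h1 : l[i]? with _ | a
      · exact hrec
      · rcases h2 : l[i+1]? with _ | b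
        · cases a <;> exact hrec
        · cases a with
          | none => exact hrec
          | some av =>
            cases b with
            | none => exact hrec
            | some bv =>
              have : (av == bv) = false := by
                unfold pvPairB at hni
                rw [h1, h2] at hni
                exact hni
              have hne : ¬ av = bv := by simpa using this
              simp only [if_neg hne]
              exact hrec

-- pvPairB on a compacted list with no adjacent pair -------------------------

theorem pvPairB_cons (x : Option Int) (l : List (Option Int)) (j : Nat) :
    pvPairB (x :: l) (j+1) = pvPairB l j := by
  simp [pvPairB]

theorem pvPairB_none (F : List (Option Int)) (hF : ∀ z ∈ F, z.isSome)
    (hA : pvAdj F = false) (k j : Nat) :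
    pvPairB (F ++ List.replicate k none) j = false := by
  induction F generalizing j with
  | nil =>
    simp only [List.nil_append]
    unfold pvPairB
    have h1 : (List.replicate k (none : Option Int))[j]? = if j < k then some none else none :=
      List.getElem?_replicate
    have h2 : (List.replicate k (none : Option Int))[j+1]? = if j + 1 < k then some none else none :=
      List.getElem?_replicate
    rw [h1, h2]
    by_cases ha : j < k <;> by_cases hb : j + 1 < k <;> simp [ha, hb]
  | cons x F' ih =>
    cases j with
    | succ j' =>
      rw [List.cons_append, pvPairB_cons]
      exact ih (fun z hz => hF z (by simp [hz])) (by
        cases F' with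
        | nil => simp [pvAdj]
        | cons y t => simp only [pvAdj, Bool.or_eq_false_iff] at hA; exact hA.2) j'
    | zero =>
      obtain ⟨xv, hxv⟩ : ∃ v, x = some v := Option.isSome_iff_exists.mp (hF x (by simp))
      cases F' with
      | cons y t =>
        obtain ⟨yv, hyv⟩ : ∃ v, y = some v := Option.isSome_iff_exists.mp (hF y (by simp))
        have hxy : (x == y) = false := by
          simp only [pvAdj, Bool.or_eq_false_iff] at hA
          have := hA.1
          rw [hxv] at this ⊢
          simpa using this
        unfold pvPairB
        simp [hxv, hyv]
        intro h
        rw [hxv, hyv] at hxy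
        simp_all
      | nil =>
        unfold pvPairB
        cases k with
        | zero => simp
        | succ k' => simp [hxv, List.replicate_succ]

-- adjacent pair gives a pvPairB index ---------------------------------------

theorem pvAdj_exists (F : List (Option Int)) (hF : ∀ z ∈ F, z.isSome)
    (hA : pvAdj F = true) (k : Nat) :
    ∃ j, pvPairB (F ++ List.replicate k none) j = true := by
  induction F with
  | nil => simp [pvAdj] at hA
  | cons x F' ih =>
    cases F' with
    | nil => simp [pvAdj] at hA
    | cons y t =>
      simp only [pvAdj, Bool.or_eq_true] at hA
      rcases hA with h | h
      · obtain ⟨xv, hxv⟩ : ∃ v, x = some v := Option.isSome_iff_exists.mp (hF x (by simp))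
        rw [Bool.and_eq_true] at h
        have hxy : x = y := by simpa using h.2
        refine ⟨0, ?_⟩
        unfold pvPairB
        simp [hxv, ← hxy]
      · obtain ⟨j, hj⟩ := ih (fun z hz => hF z (by simp at hz ⊢; tauto)) h
        exact ⟨j + 1, by rwa [List.cons_append, pvPairB_cons]⟩

-- main proof ---------------------------------------------------------------

theorem pv_main (row : List (Option Int)) : rowCanShift row = rowCanShift_alt row := by
  have hF : ∀ z ∈ pvF row, z.isSome := by
    intro z hz
    simp only [pvF, List.mem_filter] at hz
    exact hz.2
  have hcomp := pvCompact_spec row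
  rw [alt_spec]
  unfold rowCanShift
  simp only [hcomp]
  set F := pvF row with hFdef
  set k := pvK row with hkdef
  by_cases hgap : pvGap row = true
  · -- compacted ≠ row, and merging can only lower the tile count: result ≠ row
    have hne : F ++ List.replicate k none ≠ row := by
      intro h
      rw [← h] at hgap
      rw [pvGap_compacted F hF k] at hgap
      exact Bool.false_ne_true hgap
    have hCS : pvCS (F ++ List.replicate k none) = pvCS row := pvCS_compacted row
    rcases pvMerge_le row.length (F ++ List.replicate k none) 0 with h | h
    · simp [h, hne, hgap]
    · have : pvMerge row.length (F ++ List.replicate k none) 0 ≠ row := by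
        intro he
        rw [pvCS_eq_of_eq he, hCS] at h
        omega
      simp [this, hgap]
  · have hgap' : pvGap row = false := by simpa using hgap
    have hrow : row = F ++ List.replicate k none := pv_no_gap_eq row hgap'
    by_cases hadj : pvAdj F = true
    · -- a merge fires: tile count drops, result ≠ row
      obtain ⟨j, hj⟩ := pvAdj_exists F hF hadj k
      -- minimal such j
      have hex : ∃ j, pvPairB (F ++ List.replicate k none) j = true := ⟨j, hj⟩
      have hj0 : pvPairB (F ++ List.replicate k none) (Nat.find hex) = true := Nat.find_spec hex
      have hmin0 : ∀ j', j' < Nat.find hex → pvPairB (F ++ List.replicate k none) j' = false := by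
        intro j' h'
        have := Nat.find_min hex h'
        simpa using this
      have hj01 : Nat.find hex + 1 < (F ++ List.replicate k none).length := by
        obtain ⟨x, _, hy⟩ := pvPairB_exists _ _ hj0
        exact (List.getElem?_eq_some_iff.1 hy).1
      have hlen : (F ++ List.replicate k none).length = row.length := by rw [← hrow]
      have hfire := pvMerge_fires row.length (F ++ List.replicate k none) 0 (Nat.find hex) hj0
        (Nat.zero_le _) (fun j' _ h2 => hmin0 j' h2) (by omega)
      have : pvMerge row.length (F ++ List.replicate k none) 0 ≠ row := by
        intro he
        have h1 := pvCS_eq_of_eq he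
        have h2 : pvCS (F ++ List.replicate k none) = pvCS row := pvCS_compacted row
        omega
      simp [this, hadj]
    · -- nothing fires: result = compacted = row
      have hadj' : pvAdj F = false := by simpa using hadj
      have hid := pvMerge_id row.length (F ++ List.replicate k none) 0
        (pvPairB_none F hF hadj' k)
      rw [hid, ← hrow]
      simp [hadj', hgap']

-- ===== VERDICT (by name: the statement is the Claim_ definition above) =====
theorem rowCanShift_spec : Claim_equal_rowCanShift := by
  intro row _
  unfold Spec_rowCanShift
  exact pv_main row
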